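-- pv_equiv track=rewrite | github.com/nimbusproject/nimbus | ctx-broker/home/lib/pynimbusconfig/pathutil.py | mode600
-- ===== SOURCE A (Python) =====
-- import stat
--
-- def mode600(mode):
--     mode = stat.S_IMODE(mode)
--     if not mode & stat.S_IRUSR:
--         return False
--     if not mode & stat.S_IWUSR:
--         return False
--     for i in ("GRP", "OTH"):
--         for perm in "R", "W", "X":
--             if mode & getattr(stat, "S_I"+ perm + i):
--                 return False
--     return True
-- ===== SOURCE B (Python) =====
-- def mode600(mode):
--     # True iff owner-read and owner-write are set and no group/other bits are set
--     # (owner-execute is irrelevant, as in A's checks): one closed-form bit test.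
--     return mode & 0o677 == 0o600
-- ===== Notes on version B (the rewrite author's own statement) =====
-- stated objective: simpler
-- what changed: Replaces the two owner-bit guards plus the nested GRP/OTH permission loop with one closed-form bit test (mode & 0o677) == 0o600 (owner-execute is unchecked by A, so it is masked out too).
-- crash fix: On negative mode A's stat.S_IMODE raises OverflowError; B returns the ordinary bit-test result (False at -1). — e.g. on mode600(-1): A raises OverflowError, B returns false
import Mathlib
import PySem

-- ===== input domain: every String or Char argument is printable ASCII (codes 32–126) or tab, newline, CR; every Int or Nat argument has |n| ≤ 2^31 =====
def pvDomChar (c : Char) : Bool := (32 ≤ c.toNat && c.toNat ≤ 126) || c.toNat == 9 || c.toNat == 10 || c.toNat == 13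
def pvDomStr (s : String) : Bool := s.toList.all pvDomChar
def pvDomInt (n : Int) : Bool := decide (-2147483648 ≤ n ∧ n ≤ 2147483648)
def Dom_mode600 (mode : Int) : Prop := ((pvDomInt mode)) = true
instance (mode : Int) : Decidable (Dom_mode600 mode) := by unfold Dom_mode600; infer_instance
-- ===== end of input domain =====

-- B replaces A's owner-bit guards and nested GRP/OTH loop with the single
-- closed-form bit test (mode & 0o677) == 0o600; return values agree wherever A returns.

-- ===== PORT A =====
-- the inner 'for i in ("GRP","OTH"): for perm in "R","W","X"' loop, iterating
-- over the six constants getattr(stat, "S_I"+perm+i) in loop order (S_IRGRP..S_IXOTH)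
def mode600Loop (m : Int) : List Int → Bool
  | [] => true
  | c :: cs => if PySem.Int.band m c ≠ 0 then false else mode600Loop m cs

def mode600 (mode : Int) : Bool :=
  let m := PySem.Int.band mode 4095      -- stat.S_IMODE(mode) = mode & 0o7777
  if PySem.Int.band m 256 = 0 then false      -- if not mode & stat.S_IRUSR (0o400)
  else if PySem.Int.band m 128 = 0 then false -- if not mode & stat.S_IWUSR (0o200)
  else mode600Loop m [32, 16, 8, 4, 2, 1]

-- ===== PORT B =====
def mode600_alt (mode : Int) : Bool := decide (PySem.Int.band mode 447 = 384)  -- mode & 0o677 == 0o600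

-- ===== PRECONDITION & SPEC =====
-- Pre_ excludes exactly the negative modes: there stat.S_IMODE raises OverflowError.
def Pre_mode600 (mode : Int) : Prop := 0 ≤ mode
instance (mode : Int) : Decidable (Pre_mode600 mode) := by unfold Pre_mode600; infer_instance
def pvWitness_mode600 : Int := 384

-- On negative mode A raises OverflowError (stat.S_IMODE); B returns the ordinary bit-test result.
def Raises_mode600 (mode : Int) : Prop := mode < 0
instance (mode : Int) : Decidable (Raises_mode600 mode) := by unfold Raises_mode600; infer_instance
def pvRaiseWitness_mode600 : Int := -1
def pvRaiseWitnessOut_mode600 : Bool := false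

def Spec_mode600 (mode : Int) (out : Bool) : Prop := out = mode600_alt mode
instance (mode : Int) (out : Bool) : Decidable (Spec_mode600 mode out) := by unfold Spec_mode600; infer_instance

-- ===== CLAIM (what is proved, stated in full; the proofs are below) =====
def Claim_equal_mode600 : Prop := ∀ (mode : Int), Dom_mode600 mode → Pre_mode600 mode → Spec_mode600 mode (mode600 mode)
def Claim_raises_mode600 : Prop := (∀ (mode : Int), Dom_mode600 mode → Raises_mode600 mode → ¬ Pre_mode600 mode) ∧ (Dom_mode600 (pvRaiseWitness_mode600) ∧ Raises_mode600 (pvRaiseWitness_mode600) ∧ mode600_alt (pvRaiseWitness_mode600) = pvRaiseWitnessOut_mode600)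

-- ===== LEMMAS AND PROOFS =====
-- every mask either program probes fits in the low 9 bits, so only k % 512 matters
theorem key_small (k c : Nat) (h : 511 &&& c = c) : k &&& c = (k % 512) &&& c := by
  conv_lhs => rw [← h, ← Nat.land_assoc]
  rw [Nat.and_two_pow_sub_one_eq_mod k 9]

theorem probe (k c : Nat) (h1 : 4095 &&& c = c) (h2 : 511 &&& c = c) :
    k &&& 4095 &&& c = (k % 512) &&& c := by
  rw [Nat.land_assoc, h1]
  exact key_small k c h2

set_option maxRecDepth 4000 in
theorem natKey (k : Nat) : mode600 (k : Int) = mode600_alt (k : Int) := by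
  have h4095 : PySem.Int.band ((k : Nat) : Int) 4095 = ((k &&& 4095 : Nat) : Int) := by
    rw [show (4095 : Int) = ((4095 : Nat) : Int) from rfl]
    exact PySem.Int.band_natCast k 4095
  have h256 : PySem.Int.band ((k &&& 4095 : Nat) : Int) 256 = (((k % 512) &&& 256 : Nat) : Int) := by
    rw [show (256 : Int) = ((256 : Nat) : Int) from rfl, PySem.Int.band_natCast,
      probe k 256 (by decide) (by decide)]
  have h128 : PySem.Int.band ((k &&& 4095 : Nat) : Int) 128 = (((k % 512) &&& 128 : Nat) : Int) := by
    rw [show (128 : Int) = ((128 : Nat) : Int) from rfl, PySem.Int.band_natCast,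
      probe k 128 (by decide) (by decide)]
  have h32 : PySem.Int.band ((k &&& 4095 : Nat) : Int) 32 = (((k % 512) &&& 32 : Nat) : Int) := by
    rw [show (32 : Int) = ((32 : Nat) : Int) from rfl, PySem.Int.band_natCast,
      probe k 32 (by decide) (by decide)]
  have h16 : PySem.Int.band ((k &&& 4095 : Nat) : Int) 16 = (((k % 512) &&& 16 : Nat) : Int) := by
    rw [show (16 : Int) = ((16 : Nat) : Int) from rfl, PySem.Int.band_natCast,
      probe k 16 (by decide) (by decide)]
  have h8 : PySem.Int.band ((k &&& 4095 : Nat) : Int) 8 = (((k % 512) &&& 8 : Nat) : Int) := by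
    rw [show (8 : Int) = ((8 : Nat) : Int) from rfl, PySem.Int.band_natCast,
      probe k 8 (by decide) (by decide)]
  have h4 : PySem.Int.band ((k &&& 4095 : Nat) : Int) 4 = (((k % 512) &&& 4 : Nat) : Int) := by
    rw [show (4 : Int) = ((4 : Nat) : Int) from rfl, PySem.Int.band_natCast,
      probe k 4 (by decide) (by decide)]
  have h2 : PySem.Int.band ((k &&& 4095 : Nat) : Int) 2 = (((k % 512) &&& 2 : Nat) : Int) := by
    rw [show (2 : Int) = ((2 : Nat) : Int) from rfl, PySem.Int.band_natCast,
      probe k 2 (by decide) (by decide)]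
  have h1 : PySem.Int.band ((k &&& 4095 : Nat) : Int) 1 = (((k % 512) &&& 1 : Nat) : Int) := by
    rw [show (1 : Int) = ((1 : Nat) : Int) from rfl, PySem.Int.band_natCast,
      probe k 1 (by decide) (by decide)]
  have h447 : PySem.Int.band ((k : Nat) : Int) 447 = (((k % 512) &&& 447 : Nat) : Int) := by
    rw [show (447 : Int) = ((447 : Nat) : Int) from rfl, PySem.Int.band_natCast,
      key_small k 447 (by decide)]
  have hr : k % 512 < 512 := Nat.mod_lt _ (by norm_num)
  simp only [mode600, mode600_alt, mode600Loop, h4095, h447,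
    h256, h128, h32, h16, h8, h4, h2, h1,
    Nat.cast_eq_zero, show (384 : Int) = ((384 : Nat) : Int) from rfl, Nat.cast_inj]
  revert hr
  generalize k % 512 = r
  revert r
  decide

-- ===== VERDICT (by name: the statement is the Claim_ definition above) =====
theorem mode600_spec : Claim_equal_mode600 := by
  intro mode _ hpre
  unfold Spec_mode600
  obtain ⟨k, rfl⟩ := Int.eq_ofNat_of_zero_le hpre
  exact natKey k

@[simp]
theorem mode600_raises : Claim_raises_mode600 := by
  unfold Claim_raises_mode600
  exact ⟨fun mode _ h => by unfold Raises_mode600 at h; unfold Pre_mode600; omega, by decide⟩
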